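-- pv_equiv track=rewrite | github.com/Goodman-lab/CONFPASS | BinsTest_rmsCheck.py | put_item2list
-- ===== SOURCE A (Python) =====
-- def put_item2list(cluster_ls,new_item):
--
--     new_cluster_ls=cluster_ls
--     new_TF=[]
--
--     for i in new_cluster_ls:
--         if new_item[0] not in i and new_item[1] not in i:
--             new_TF.append('F')
--
--         elif new_item[0] in i and new_item[1] not in i:
--             new_TF.append('T1')
--
--         elif new_item[0] not in i and new_item[1]  in i:
--             new_TF.append('T0')
--
--         elif new_item[0] in i and new_item[1] in i:
--             new_TF.append('T')
--
--
--     if 'T1' in new_TF: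
--         append_idx=new_TF.index('T1')
--         new_cluster_ls[append_idx].append(new_item[1])
--
--     elif 'T0' in new_TF:
--         append_idx=new_TF.index('T0')
--         new_cluster_ls[append_idx].append(new_item[0])
--
--     elif 'T' in new_TF:
--         pass
--
--     else:
--         new_cluster_ls.append(new_item)
--
--     return new_cluster_ls
-- ===== SOURCE B (Python) =====
-- def put_item2list(cluster_ls, new_item):
--     # Staged searches with early return instead of one classification pass:
--     # 1) first cluster with item0 but not item1 -> append item1 there;
--     # 2) else first cluster with item1 but not item0 -> append item0 there;
--     # 3) else append new_item unless some cluster already contains item0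
--     #    (at this stage any cluster containing item0 contains both items).
--     # Mutates cluster_ls in place (like the original) and returns it.
--     for c in cluster_ls:
--         if new_item[0] in c and new_item[1] not in c:
--             c.append(new_item[1])
--             return cluster_ls
--     for c in cluster_ls:
--         if new_item[1] in c and new_item[0] not in c:
--             c.append(new_item[0])
--             return cluster_ls
--     if not any(new_item[0] in c for c in cluster_ls):
--         cluster_ls.append(new_item)
--     return cluster_ls
-- ===== Notes on version B (the rewrite author's own statement) =====
-- stated objective: simpler
-- what changed: Replaces A's tag-list construction ('F'/'T1'/'T0'/'T') plus the later 'in'/'.index' scans by staged early-return searches: first search for a cluster holding item0 only, then for one holding item1 only, and finally a single containment test that decides between doing nothing and appending the pair.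
import Mathlib
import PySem

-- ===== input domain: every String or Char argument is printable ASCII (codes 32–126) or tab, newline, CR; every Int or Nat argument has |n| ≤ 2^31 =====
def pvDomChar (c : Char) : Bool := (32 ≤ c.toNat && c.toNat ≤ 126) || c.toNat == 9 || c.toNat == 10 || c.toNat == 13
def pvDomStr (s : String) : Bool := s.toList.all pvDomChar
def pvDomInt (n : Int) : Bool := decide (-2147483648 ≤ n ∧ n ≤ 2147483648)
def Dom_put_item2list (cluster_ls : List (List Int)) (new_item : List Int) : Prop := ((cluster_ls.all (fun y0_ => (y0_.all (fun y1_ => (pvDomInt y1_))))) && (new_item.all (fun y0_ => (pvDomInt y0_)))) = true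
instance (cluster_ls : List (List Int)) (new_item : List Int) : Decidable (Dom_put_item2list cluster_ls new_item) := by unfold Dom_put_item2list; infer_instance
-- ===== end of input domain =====

-- B replaces A's tag list + index scans by staged early-return searches; equivalence is about the
-- return value (both Pythons mutate the aliased argument identically, so the mutation also agrees).

-- ===== PORT A =====
-- A: build the tag list new_TF ('F'/'T1'/'T0'/'T'), then scan it with 'in' / '.index'.
-- new_item[0] / new_item[1] as getD: Pre_ guarantees they exist whenever the loop body runs.
def put_item2list (cluster_ls : List (List Int)) (new_item : List Int) : List (List Int) :=
  let a := new_item.getD 0 0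
  let b := new_item.getD 1 0
  let new_TF : List String := cluster_ls.foldl (fun acc i =>
      if a ∉ i ∧ b ∉ i then acc ++ ["F"]
      else if a ∈ i ∧ b ∉ i then acc ++ ["T1"]
      else if a ∉ i ∧ b ∈ i then acc ++ ["T0"]
      else if a ∈ i ∧ b ∈ i then acc ++ ["T"]
      else acc) []
  if new_TF.contains "T1" then
    cluster_ls.modify ((PySem.List.index? new_TF "T1").getD 0) (fun c => c ++ [b])
  else if new_TF.contains "T0" then
    cluster_ls.modify ((PySem.List.index? new_TF "T0").getD 0) (fun c => c ++ [a])
  else if new_TF.contains "T" then cluster_ls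
  else cluster_ls ++ [new_item]

-- ===== PORT B =====
-- B's 'for … if … append; return' loop: append x to the first cluster satisfying p,
-- none if no cluster matches (the Python falls through to the next stage).
def pvAppendFirst (p : List Int → Bool) (x : Int) : List (List Int) → Option (List (List Int))
  | [] => none
  | c :: rest => if p c then some ((c ++ [x]) :: rest)
                 else (pvAppendFirst p x rest).map (c :: ·)

def put_item2list_alt (cluster_ls : List (List Int)) (new_item : List Int) : List (List Int) :=
  let a := new_item.getD 0 0
  let b := new_item.getD 1 0
  match pvAppendFirst (fun c => decide (a ∈ c) && !decide (b ∈ c)) b cluster_ls with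
  | some r => r
  | none =>
    match pvAppendFirst (fun c => decide (b ∈ c) && !decide (a ∈ c)) a cluster_ls with
    | some r => r
    | none => if cluster_ls.any (fun c => decide (a ∈ c)) then cluster_ls
              else cluster_ls ++ [new_item]

-- ===== PRECONDITION & SPEC =====
-- A raises IndexError on new_item[0]/new_item[1] whenever the loop body runs with len(new_item) < 2;
-- with an empty cluster_ls the subscripts are never evaluated and A returns normally.
def Pre_put_item2list (cluster_ls : List (List Int)) (new_item : List Int) : Prop :=
  cluster_ls = [] ∨ 2 ≤ new_item.length
instance (cluster_ls : List (List Int)) (new_item : List Int) : Decidable (Pre_put_item2list cluster_ls new_item) := by unfold Pre_put_item2list; infer_instance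
def pvWitness_put_item2list : List (List Int) × List Int := ([[1, 2], [3]], [1, 4])

def Spec_put_item2list (cluster_ls : List (List Int)) (new_item : List Int) (out : List (List Int)) : Prop := out = put_item2list_alt cluster_ls new_item
instance (cluster_ls : List (List Int)) (new_item : List Int) (out : List (List Int)) : Decidable (Spec_put_item2list cluster_ls new_item out) := by unfold Spec_put_item2list; infer_instance

-- ===== CLAIM (what is proved, stated in full; the proofs are below) =====
def Claim_equal_put_item2list : Prop := ∀ (cluster_ls : List (List Int)) (new_item : List Int), Dom_put_item2list cluster_ls new_item → Pre_put_item2list cluster_ls new_item → Spec_put_item2list cluster_ls new_item (put_item2list cluster_ls new_item)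

-- ===== LEMMAS AND PROOFS =====

-- the tag A's loop appends for a cluster c
def pvTag (a b : Int) (c : List Int) : String :=
  if a ∉ c ∧ b ∉ c then "F"
  else if a ∈ c ∧ b ∉ c then "T1"
  else if a ∉ c ∧ b ∈ c then "T0"
  else "T"

lemma pvTagA_foldl (a b : Int) (cls : List (List Int)) (acc : List String) :
    cls.foldl (fun acc i =>
      if a ∉ i ∧ b ∉ i then acc ++ ["F"]
      else if a ∈ i ∧ b ∉ i then acc ++ ["T1"]
      else if a ∉ i ∧ b ∈ i then acc ++ ["T0"]
      else if a ∈ i ∧ b ∈ i then acc ++ ["T"]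
      else acc) acc = acc ++ cls.map (pvTag a b) := by
  induction cls generalizing acc with
  | nil => simp
  | cons c rest ih =>
      simp only [List.foldl_cons, List.map_cons, ih]
      by_cases h1 : a ∈ c <;> by_cases h2 : b ∈ c <;> simp [pvTag, h1, h2]

lemma pvTagB_T1 (a b : Int) (c : List Int) :
    (pvTag a b c == "T1") = (decide (a ∈ c) && !decide (b ∈ c)) := by
  by_cases h1 : a ∈ c <;> by_cases h2 : b ∈ c <;> simp [pvTag, h1, h2]

lemma pvTagB_T0 (a b : Int) (c : List Int) :
    (pvTag a b c == "T0") = (decide (b ∈ c) && !decide (a ∈ c)) := by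
  by_cases h1 : a ∈ c <;> by_cases h2 : b ∈ c <;> simp [pvTag, h1, h2]

lemma pvTagB_T (a b : Int) (c : List Int) :
    (pvTag a b c == "T") = (decide (a ∈ c) && decide (b ∈ c)) := by
  by_cases h1 : a ∈ c <;> by_cases h2 : b ∈ c <;> simp [pvTag, h1, h2]

-- index? / contains on a mapped list, as findIdx? / any of the composed predicate
lemma pvIndex?_map (g : List Int → String) (s : String) (cls : List (List Int)) :
    PySem.List.index? (cls.map g) s = List.findIdx? (fun c => g c == s) cls := by
  induction cls with
  | nil => simp
  | cons c rest ih =>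
      by_cases h : g c = s
      · rw [List.map_cons, h, PySem.List.index?_cons_self]
        simp [List.findIdx?_cons, h]
      · rw [List.map_cons, PySem.List.index?_cons_of_ne _ h, ih]
        simp [List.findIdx?_cons, h]

lemma pvContains_map (g : List Int → String) (s : String) (cls : List (List Int)) :
    (cls.map g).contains s = cls.any (fun c => g c == s) := by
  induction cls with
  | nil => rfl
  | cons c rest ih =>
      have hcomm : (s == g c) = (g c == s) := by
        by_cases h : g c = s
        · simp [h]
        · simp [h, Ne.symm h]
      rw [List.map_cons, List.contains_cons, List.any_cons, ih, hcomm]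

-- B's early-return search, characterised by findIdx? + modify
lemma pvAppendFirst_eq (p : List Int → Bool) (x : Int) (cls : List (List Int)) :
    pvAppendFirst p x cls =
      (List.findIdx? p cls).map (fun i => cls.modify i (fun c => c ++ [x])) := by
  induction cls with
  | nil => rfl
  | cons c rest ih =>
      by_cases h : p c <;>
        simp [pvAppendFirst, h, ih, List.findIdx?_cons, Option.map_map, Function.comp_def,
              List.modify_cons]

-- when no cluster holds a without b, 'some cluster holds a' = 'some cluster holds both'
lemma pvAny_both (a b : Int) (cls : List (List Int))
    (h : cls.any (fun c => decide (a ∈ c) && !decide (b ∈ c)) = false) :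
    cls.any (fun c => decide (a ∈ c)) = cls.any (fun c => decide (a ∈ c) && decide (b ∈ c)) := by
  induction cls with
  | nil => rfl
  | cons c rest ih =>
      simp only [List.any_cons, Bool.or_eq_false_iff] at h
      rw [List.any_cons, List.any_cons, ih h.2]
      by_cases h1 : a ∈ c <;> by_cases h2 : b ∈ c <;> simp_all

-- ===== VERDICT (by name: the statement is the Claim_ definition above) =====
theorem put_item2list_spec : Claim_equal_put_item2list := by
  intro cls ni _ _
  show put_item2list cls ni = put_item2list_alt cls ni
  unfold put_item2list put_item2list_alt
  simp only [pvTagA_foldl, List.nil_append, pvAppendFirst_eq,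
    pvContains_map, pvIndex?_map, pvTagB_T1, pvTagB_T0, pvTagB_T]
  generalize ni.getD 0 0 = aa
  generalize ni.getD 1 0 = bb
  rcases h1 : List.findIdx? (fun c => decide (aa ∈ c) && !decide (bb ∈ c)) cls with _ | i
  · rcases h0 : List.findIdx? (fun c => decide (bb ∈ c) && !decide (aa ∈ c)) cls with _ | j
    · have a1 : cls.any (fun c => decide (aa ∈ c) && !decide (bb ∈ c)) = false := by
        rw [← List.findIdx?_isSome, h1]; rfl
      have a0 : cls.any (fun c => decide (bb ∈ c) && !decide (aa ∈ c)) = false := by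
        rw [← List.findIdx?_isSome, h0]; rfl
      rw [pvAny_both aa bb cls a1] at *
      cases hT : cls.any (fun c => decide (aa ∈ c) && decide (bb ∈ c)) <;>
        simp [a1, a0]
    · have a1 : cls.any (fun c => decide (aa ∈ c) && !decide (bb ∈ c)) = false := by
        rw [← List.findIdx?_isSome, h1]; rfl
      have a0 : cls.any (fun c => decide (bb ∈ c) && !decide (aa ∈ c)) = true := by
        rw [← List.findIdx?_isSome, h0]; rfl
      simp [a1, a0]
  · have a1 : cls.any (fun c => decide (aa ∈ c) && !decide (bb ∈ c)) = true := by
      rw [← List.findIdx?_isSome, h1]; rfl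
    simp [a1]
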